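-- pv_equiv track=rewrite | github.com/stevezhai139/HSM_gated_5 | code/experiments/tier2/hsm_burst_end_to_end.py | build_trace
-- ===== SOURCE A (Python) =====
-- QUERIES_PER_PHASE = 35
--
-- PHASE_ORDER       = ["Steady_Point", "Burst_Alt", "Burst_Grp"]
--
-- def build_trace(pool: list[tuple[str, str, str, str]], seed: int) \
--         -> list[tuple[str, str, str, str]]:
--     """
--     Preserve strict phase order — Phase 1 then Phase 2 then Phase 3 — so the
--     transition windows {7, 14} are deterministic.  Within a phase the order
--     is already fixed by build_query_pool (Burst_Alt relies on the period-2
--     pattern, so we do NOT shuffle inside a phase).  The ``seed`` argument is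
--     kept for symmetry with the OLTP runner; it drives build_query_pool via
--     the caller.
--     """
--     _ = seed  # already baked into the pool via build_query_pool(seed)
--     trace: list[tuple[str, str, str, str]] = []
--     for phase in PHASE_ORDER:
--         members = [r for r in pool if r[1] == phase]
--         trace.extend(members[:QUERIES_PER_PHASE])
--     return trace
-- ===== SOURCE B (Python) =====
-- QUERIES_PER_PHASE = 35
--
-- PHASE_ORDER = ["Steady_Point", "Burst_Alt", "Burst_Grp"]
--
-- def build_trace(pool, seed):
--     # One grouping pass over pool, then assembly over PHASE_ORDER;
--     # buckets for phases outside PHASE_ORDER are built but never read.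
--     buckets: dict[str, list] = {}
--     for r in pool:
--         buckets.setdefault(r[1], []).append(r)
--     trace = []
--     for phase in PHASE_ORDER:
--         trace.extend(buckets.get(phase, [])[:QUERIES_PER_PHASE])
--     return trace
-- ===== Notes on version B (the rewrite author's own statement) =====
-- stated objective: alternative
-- what changed: Replaces the three per-phase filter scans of the pool with a single grouping pass into a dict of lists plus an assembly pass over PHASE_ORDER.
import Mathlib
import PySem

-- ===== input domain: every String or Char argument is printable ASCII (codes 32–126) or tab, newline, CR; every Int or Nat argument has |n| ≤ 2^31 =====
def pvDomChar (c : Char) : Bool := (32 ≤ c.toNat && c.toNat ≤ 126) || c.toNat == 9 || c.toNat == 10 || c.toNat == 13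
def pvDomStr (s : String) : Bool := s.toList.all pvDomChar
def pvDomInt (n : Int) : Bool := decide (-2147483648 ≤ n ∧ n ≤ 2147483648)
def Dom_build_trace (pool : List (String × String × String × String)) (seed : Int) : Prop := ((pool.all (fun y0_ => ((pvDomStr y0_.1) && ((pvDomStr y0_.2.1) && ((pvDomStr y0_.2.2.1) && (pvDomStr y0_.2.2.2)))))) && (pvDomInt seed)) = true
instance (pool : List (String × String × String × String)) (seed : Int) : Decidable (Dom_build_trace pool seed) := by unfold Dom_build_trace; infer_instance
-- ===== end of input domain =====

-- B replaces A's three per-phase filter scans with one grouping pass into a dict plus an assembly pass (alternative decomposition, same cost class).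

def PHASE_ORDER : List String := ["Steady_Point", "Burst_Alt", "Burst_Grp"]

def QUERIES_PER_PHASE : Nat := 35

-- ===== PORT A =====
-- for phase in PHASE_ORDER: trace.extend([r for r in pool if r[1] == phase][:35])
def build_trace (pool : List (String × String × String × String)) (seed : Int) : List (String × String × String × String) :=
  PHASE_ORDER.foldl
    (fun trace phase =>
      trace ++ (pool.filter (fun r => r.2.1 == phase)).take QUERIES_PER_PHASE)
    []

-- ===== PORT B =====
-- buckets.setdefault(r[1], []).append(r), then assembly over PHASE_ORDER
def build_trace_alt (pool : List (String × String × String × String)) (seed : Int) : List (String × String × String × String) :=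
  let buckets : PySem.Dict String (List (String × String × String × String)) :=
    pool.foldl (fun d r => d.modify r.2.1 [] (fun l => l ++ [r])) PySem.Dict.empty
  PHASE_ORDER.foldl
    (fun trace phase => trace ++ (buckets.getD phase []).take QUERIES_PER_PHASE)
    []

-- ===== PRECONDITION & SPEC =====
def Spec_build_trace (pool : List (String × String × String × String)) (seed : Int) (out : List (String × String × String × String)) : Prop := out = build_trace_alt pool seed
instance (pool : List (String × String × String × String)) (seed : Int) (out : List (String × String × String × String)) : Decidable (Spec_build_trace pool seed out) := by unfold Spec_build_trace; infer_instance

-- ===== CLAIM (what is proved, stated in full; the proofs are below) =====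
def Claim_equal_build_trace : Prop := ∀ (pool : List (String × String × String × String)) (seed : Int), Dom_build_trace pool seed → Spec_build_trace pool seed (build_trace pool seed)

-- ===== LEMMAS AND PROOFS =====

-- the grouping fold's bucket for key p is exactly the filter of the processed rows
theorem bucket_eq_filter (pool : List (String × String × String × String))
    (d : PySem.Dict String (List (String × String × String × String))) (p : String) :
    (pool.foldl (fun d r => d.modify r.2.1 [] (fun l => l ++ [r])) d).getD p []
      = d.getD p [] ++ pool.filter (fun r => r.2.1 == p) := by
  induction pool generalizing d with
  | nil => simp
  | cons r rest ih =>
    simp only [List.foldl_cons, List.filter_cons, ih]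
    rw [PySem.Dict.getD_modify]
    by_cases h : p = r.2.1
    · simp [h]
    · simp [h, beq_iff_eq]; exact fun hh => h hh.symm

-- ===== VERDICT (by name: the statement is the Claim_ definition above) =====
theorem build_trace_spec : Claim_equal_build_trace := by
  intro pool seed _
  unfold Spec_build_trace build_trace build_trace_alt
  simp [PHASE_ORDER, bucket_eq_filter]
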